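-- pv_equiv track=rewrite | github.com/career-prep/ucp-namer-latam-2026 | aungnanda_oo/q6_RoadNetworks.py | roadNetworks
-- ===== SOURCE A (Python) =====
-- def roadNetworks(towns, roads):
--     graph = {town: [] for town in towns}
--     for a, b in roads:
--         if a in graph:
--             graph[a].append(b)
--         if b in graph:
--             graph[b].append(a)
--
--     visited = set()
--     count = 0
--
--     def dfs(town, component):
--         visited.add(town)
--         component.append(town)
--         for neighbor in graph.get(town, []):
--             if neighbor not in visited:
--                 dfs(neighbor, component)
--
--     for town in towns:
--         if town not in visited:
--             component = []
--             dfs(town, component)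
--             if len(component) > 1:
--                 count += 1
--
--     return count
-- ===== SOURCE B (Python) =====
-- def roadNetworks(towns, roads):
--     # group every road endpoint once, then restrict the adjacency to towns
--     nbrs = {}
--     for a, b in roads:
--         nbrs.setdefault(a, []).append(b)
--         nbrs.setdefault(b, []).append(a)
--     adj = {t: nbrs.get(t, []) for t in towns}
--     visited = set()
--     count = 0
--     for t in towns:
--         if t in visited:
--             continue
--         size = 0
--         frontier = [t]
--         while frontier:
--             nxt = []
--             for node in frontier:
--                 if node not in visited:
--                     visited.add(node)
--                     size += 1
--                     nxt.extend(adj.get(node, []))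
--             frontier = nxt
--         if size > 1:
--             count += 1
--     return count
-- ===== Notes on version B (the rewrite author's own statement) =====
-- stated objective: alternative
-- what changed: The incrementally appended towns-keyed adjacency dict and recursive DFS with a per-component node list are replaced by a one-pass endpoint-grouping dict restricted to towns and a level-by-level BFS over frontier lists that keeps only an integer size counter.
import Mathlib
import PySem

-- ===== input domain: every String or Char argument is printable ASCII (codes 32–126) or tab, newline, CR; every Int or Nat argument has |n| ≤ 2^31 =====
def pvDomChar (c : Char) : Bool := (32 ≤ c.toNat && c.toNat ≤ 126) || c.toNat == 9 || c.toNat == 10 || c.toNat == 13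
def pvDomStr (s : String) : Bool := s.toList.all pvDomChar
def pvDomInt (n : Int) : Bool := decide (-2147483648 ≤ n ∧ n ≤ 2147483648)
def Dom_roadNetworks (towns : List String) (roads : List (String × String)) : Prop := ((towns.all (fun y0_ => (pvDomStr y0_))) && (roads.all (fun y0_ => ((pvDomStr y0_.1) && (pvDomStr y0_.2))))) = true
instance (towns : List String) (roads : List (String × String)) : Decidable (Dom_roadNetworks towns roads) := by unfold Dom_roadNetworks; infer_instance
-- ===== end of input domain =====

-- B replaces A's incrementally-appended adjacency dict and recursive DFS (which builds a
-- per-component node list) by a per-town comprehension-built adjacency dict and a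
-- level-by-level BFS over frontier lists keeping only an integer size counter (objective: alternative).

-- ===== PORT A =====
-- 'graph = {town: [] for town in towns}' followed by the per-road append loop
def pvBuildGraph (towns : List String) (roads : List (String × String)) :
    PySem.Dict String (List String) :=
  let g0 := towns.foldl (fun g t => g.insert t ([] : List String)) PySem.Dict.empty
  roads.foldl (fun g r =>
    let g1 := if g.contains r.1 then g.modify r.1 [] (fun l => l ++ [r.2]) else g
    if g1.contains r.2 then g1.modify r.2 [] (fun l => l ++ [r.1]) else g1) g0

-- fuel: an upper bound on the recursion depth (Python has no fuel; it is provably sufficient)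
def pvFuelA (towns : List String) : Nat := towns.length + 1

-- 'def dfs(town, component)': marks town, appends it to component, then recurses on unvisited neighbors
def pvDfsA (g : PySem.Dict String (List String)) :
    Nat → String → PySem.Set String → List String → PySem.Set String × List String
  | 0, _, v, c => (v, c)
  | f + 1, t, v, c =>
      (g.getD t []).foldl
        (fun s nb => if PySem.Set.contains s.1 nb then s else pvDfsA g f nb s.1 s.2)
        (PySem.Set.add v t, c ++ [t])

def roadNetworks (towns : List String) (roads : List (String × String)) : Int :=
  let g := pvBuildGraph towns roads
  (towns.foldl
    (fun (s : PySem.Set String × Int) t =>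
      if PySem.Set.contains s.1 t then s
      else
        let r := pvDfsA g (pvFuelA towns) t s.1 []
        (r.1, if 1 < r.2.length then s.2 + 1 else s.2))
    (PySem.Set.empty, 0)).2

-- ===== PORT B =====
-- 'nbrs.setdefault(a, []).append(b); nbrs.setdefault(b, []).append(a)' for every road
def pvNbrs (roads : List (String × String)) : PySem.Dict String (List String) :=
  roads.foldl
    (fun d r => (d.modify r.1 [] (fun l => l ++ [r.2])).modify r.2 [] (fun l => l ++ [r.1]))
    PySem.Dict.empty

-- 'adj = {t: nbrs.get(t, []) for t in towns}'
def pvBuildAdj (towns : List String) (roads : List (String × String)) :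
    PySem.Dict String (List String) :=
  let nb := pvNbrs roads
  towns.foldl (fun g t => g.insert t (nb.getD t [])) PySem.Dict.empty

-- one BFS level: 'for node in frontier: if node not in visited: …'; state = (visited, size, nxt)
def pvLevel (g : PySem.Dict String (List String))
    (s : PySem.Set String × Int × List String) (node : String) :
    PySem.Set String × Int × List String :=
  if PySem.Set.contains s.1 node then s
  else (PySem.Set.add s.1 node, s.2.1 + 1, s.2.2 ++ g.getD node [])

-- 'while frontier: …; frontier = nxt' (fuel bounds the number of levels; provably sufficient)
def pvBfs (g : PySem.Dict String (List String)) :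
    Nat → List String → PySem.Set String → Int → PySem.Set String × Int
  | 0, _, v, n => (v, n)
  | _ + 1, [], v, n => (v, n)
  | f + 1, t :: fs, v, n =>
      let r := (t :: fs).foldl (pvLevel g) (v, n, [])
      pvBfs g f r.2.2 r.1 r.2.1

-- 'for t in towns: if t in visited: continue; …'
def pvOuterB (g : PySem.Dict String (List String)) (fuel : Nat) :
    List String → PySem.Set String → Int → Int
  | [], _, cnt => cnt
  | t :: ts, v, cnt =>
      if PySem.Set.contains v t then pvOuterB g fuel ts v cnt
      else
        let r := pvBfs g fuel [t] v 0
        pvOuterB g fuel ts r.1 (if (1 : Int) < r.2 then cnt + 1 else cnt)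

def roadNetworks_alt (towns : List String) (roads : List (String × String)) : Int :=
  pvOuterB (pvBuildAdj towns roads) (2 * towns.length + 2) towns PySem.Set.empty 0

-- ===== PRECONDITION & SPEC =====
def Spec_roadNetworks (towns : List String) (roads : List (String × String)) (out : Int) : Prop := out = roadNetworks_alt towns roads
instance (towns : List String) (roads : List (String × String)) (out : Int) : Decidable (Spec_roadNetworks towns roads out) := by unfold Spec_roadNetworks; infer_instance

-- ===== CLAIM (what is proved, stated in full; the proofs are below) =====
def Claim_equal_roadNetworks : Prop := ∀ (towns : List String) (roads : List (String × String)), Dom_roadNetworks towns roads → Spec_roadNetworks towns roads (roadNetworks towns roads)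

-- ===== LEMMAS AND PROOFS =====

-- x reachable from t through nodes outside v (the visited set at component start)
inductive pvReach (g : PySem.Dict String (List String)) (v : List String) (t : String) : String → Prop
  | refl : pvReach g v t t
  | step {u w : String} : pvReach g v t u → u ∉ v → w ∈ g.getD u [] → pvReach g v t w

def pvUnvisKeys (g : PySem.Dict String (List String)) (v : List String) : Nat :=
  (g.keys.filter (fun k => !PySem.Set.contains v k)).length

theorem pvContains_iff (s : List String) (x : String) :
    PySem.Set.contains s x = true ↔ x ∈ s := by
  simp [PySem.Set.contains]

theorem pvContains_false_iff (s : List String) (x : String) :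
    PySem.Set.contains s x = false ↔ x ∉ s := by
  rw [← Bool.not_eq_true, not_iff_not]; exact pvContains_iff s x

theorem pvReach_congr {g : PySem.Dict String (List String)} {v v' : List String} {t x : String}
    (hv : ∀ y, y ∈ v ↔ y ∈ v') (h : pvReach g v t x) : pvReach g v' t x := by
  induction h with
  | refl => exact pvReach.refl
  | step hu hnv hw ih => exact pvReach.step ih (fun hc => hnv ((hv _).mpr hc)) hw

theorem pvReach_adj {g g' : PySem.Dict String (List String)} {v : List String} {t x : String}
    (hadj : ∀ u w, w ∈ g.getD u [] ↔ w ∈ g'.getD u []) (h : pvReach g v t x) :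
    pvReach g' v t x := by
  induction h with
  | refl => exact pvReach.refl
  | step hu hnv hw ih => exact pvReach.step ih hnv ((hadj _ _).mp hw)

theorem pvReach_trans_mono {g : PySem.Dict String (List String)} {v v' : List String}
    {t u w : String} (hsub : ∀ x ∈ v, x ∈ v') (h1 : pvReach g v t u) (h2 : pvReach g v' u w) :
    pvReach g v t w := by
  induction h2 with
  | refl => exact h1
  | step hu hnv hw ih => exact pvReach.step ih (fun hc => hnv (hsub _ hc)) hw

theorem pvChar {g : PySem.Dict String (List String)} {v0 X : List String} {t : String}
    (hsub : ∀ x ∈ v0, x ∈ X) (ht : t ∈ X)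
    (hsound : ∀ x ∈ X, x ∈ v0 ∨ pvReach g v0 t x)
    (hclosed : ∀ x ∈ X, x ∉ v0 → ∀ w ∈ g.getD x [], w ∈ X) :
    ∀ x, x ∈ X ↔ (x ∈ v0 ∨ pvReach g v0 t x) := by
  intro x
  constructor
  · exact hsound x
  · rintro (hx | hx)
    · exact hsub x hx
    · induction hx with
      | refl => exact ht
      | step hu hnv hw ih => exact hclosed _ ih hnv _ hw

theorem pvUnvisKeys_mono {g : PySem.Dict String (List String)} {v v' : List String}
    (h : ∀ x ∈ v, x ∈ v') : pvUnvisKeys g v' ≤ pvUnvisKeys g v := by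
  apply List.Sublist.length_le
  apply List.monotone_filter_right
  intro a ha
  simp only [Bool.not_eq_true', pvContains_false_iff] at ha ⊢
  exact fun hc => ha (h _ hc)

theorem pvContains_add_of_ne (v : List String) (t a : String) (hat : a ≠ t) :
    PySem.Set.contains (PySem.Set.add v t) a = PySem.Set.contains v a := by
  by_cases hav : a ∈ v
  · rw [(pvContains_iff _ _).mpr hav,
      (pvContains_iff _ _).mpr ((PySem.Set.mem_add v t a).mpr (Or.inl hav))]
  · rw [(pvContains_false_iff _ _).mpr hav, (pvContains_false_iff _ _).mpr
      (fun hc => by rcases (PySem.Set.mem_add v t a).mp hc with h | h; exacts [hav h, hat h])]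

theorem pvLen_add (v : List String) (t : String) (htv : t ∉ v) :
    (PySem.Set.add v t).length = v.length + 1 := by
  simp [PySem.Set.add, htv]

theorem pvFilter_add_lt (l : List String) (v : List String) (t : String)
    (htl : t ∈ l) (htv : t ∉ v) :
    (l.filter (fun k => !PySem.Set.contains (PySem.Set.add v t) k)).length + 1 ≤
      (l.filter (fun k => !PySem.Set.contains v k)).length := by
  induction l with
  | nil => simp at htl
  | cons a l ih =>
    by_cases hat : a = t
    · subst hat
      have h1 : PySem.Set.contains (PySem.Set.add v a) a = true :=
        (pvContains_iff _ _).mpr ((PySem.Set.mem_add v a a).mpr (Or.inr rfl))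
      have h2 : PySem.Set.contains v a = false := (pvContains_false_iff _ _).mpr htv
      have hmono : (l.filter (fun k => !PySem.Set.contains (PySem.Set.add v a) k)).length ≤
          (l.filter (fun k => !PySem.Set.contains v k)).length := by
        apply List.Sublist.length_le
        apply List.monotone_filter_right
        intro x hx
        simp only [Bool.not_eq_true', pvContains_false_iff] at hx ⊢
        exact fun hc => hx ((PySem.Set.mem_add v a x).mpr (Or.inl hc))
      rw [List.filter_cons, List.filter_cons, h1, h2]
      simp only [Bool.not_true, Bool.not_false, if_neg Bool.false_ne_true, if_true,
        List.length_cons]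
      omega
    · have htl' : t ∈ l := by rcases List.mem_cons.mp htl with h | h; exact absurd h.symm hat; exact h
      have hb := pvContains_add_of_ne v t a hat
      have := ih htl'
      rw [List.filter_cons, List.filter_cons, hb]
      cases hca : PySem.Set.contains v a <;>
        simp only [Bool.not_true, Bool.not_false, if_neg Bool.false_ne_true, if_true,
          List.length_cons] <;> omega

theorem pvUnvisKeys_add_lt {g : PySem.Dict String (List String)} {v : List String} {t : String}
    (htk : t ∈ g.keys) (htv : t ∉ v) :
    pvUnvisKeys g (PySem.Set.add v t) + 1 ≤ pvUnvisKeys g v :=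
  pvFilter_add_lt g.keys v t htk htv

theorem pvUnvisKeys_le (g : PySem.Dict String (List String)) (v : List String) :
    pvUnvisKeys g v ≤ g.keys.length :=
  List.length_filter_le _ _

def pvStepA (g : PySem.Dict String (List String)) (f : Nat)
    (s : PySem.Set String × List String) (nb : String) : PySem.Set String × List String :=
  if PySem.Set.contains s.1 nb then s else pvDfsA g f nb s.1 s.2

theorem pvDfsA_succ (g : PySem.Dict String (List String)) (f : Nat) (t : String)
    (v : PySem.Set String) (c : List String) :
    pvDfsA g (f + 1) t v c =
      (g.getD t []).foldl (pvStepA g f) (PySem.Set.add v t, c ++ [t]) := rfl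

-- main lemma for A's recursive dfs
theorem pvDfsA_spec (g : PySem.Dict String (List String)) :
    ∀ (f : Nat) (v : PySem.Set String) (t : String) (c : List String),
    v.Nodup → t ∉ v → pvUnvisKeys g v < f →
    (pvDfsA g f t v c).1.Nodup ∧
    (∀ x ∈ v, x ∈ (pvDfsA g f t v c).1) ∧
    t ∈ (pvDfsA g f t v c).1 ∧
    (∀ x ∈ (pvDfsA g f t v c).1, x ∈ v ∨ pvReach g v t x) ∧
    (∀ x ∈ (pvDfsA g f t v c).1, x ∉ v → ∀ w ∈ g.getD x [], w ∈ (pvDfsA g f t v c).1) ∧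
    (pvDfsA g f t v c).2.length + v.length = c.length + (pvDfsA g f t v c).1.length := by
  intro f
  induction f with
  | zero => intro v t c _ _ hf; exact absurd hf (Nat.not_lt_zero _)
  | succ f ih =>
    intro v t c hnd htv hf
    have key : ∀ (ns : List String) (s : PySem.Set String × List String),
        (∀ u ∈ ns, u ∈ g.getD t []) →
        s.1.Nodup → (∀ x ∈ v, x ∈ s.1) → t ∈ s.1 →
        (∀ x ∈ s.1, x ∈ v ∨ pvReach g v t x) →
        (∀ x ∈ s.1, x ∉ v → x ≠ t → ∀ w ∈ g.getD x [], w ∈ s.1) →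
        s.2.length + v.length = c.length + s.1.length →
        (ns.foldl (pvStepA g f) s).1.Nodup ∧
        (∀ x ∈ s.1, x ∈ (ns.foldl (pvStepA g f) s).1) ∧
        (∀ u ∈ ns, u ∈ (ns.foldl (pvStepA g f) s).1) ∧
        t ∈ (ns.foldl (pvStepA g f) s).1 ∧
        (∀ x ∈ v, x ∈ (ns.foldl (pvStepA g f) s).1) ∧
        (∀ x ∈ (ns.foldl (pvStepA g f) s).1, x ∈ v ∨ pvReach g v t x) ∧
        (∀ x ∈ (ns.foldl (pvStepA g f) s).1, x ∉ v → x ≠ t →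
          ∀ w ∈ g.getD x [], w ∈ (ns.foldl (pvStepA g f) s).1) ∧
        (ns.foldl (pvStepA g f) s).2.length + v.length =
          c.length + (ns.foldl (pvStepA g f) s).1.length := by
      intro ns
      induction ns with
      | nil =>
        intro s hns h1 h2 h3 h4 h5 h6
        exact ⟨h1, fun x hx => hx, by simp, h3, h2, h4, h5, h6⟩
      | cons nb ns ihns =>
        intro s hns h1 h2 h3 h4 h5 h6
        rw [List.foldl_cons]
        cases hc : PySem.Set.contains s.1 nb with
        | true =>
          have hstep : pvStepA g f s nb = s := by simp only [pvStepA, hc, if_true]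
          rw [hstep]
          obtain ⟨e1, e2, e3, e4, e5, e6, e7, e8⟩ :=
            ihns s (fun u hu => hns u (List.mem_cons_of_mem _ hu)) h1 h2 h3 h4 h5 h6
          refine ⟨e1, e2, ?_, e4, e5, e6, e7, e8⟩
          intro u hu
          rcases List.mem_cons.mp hu with rfl | hu
          · exact e2 u ((pvContains_iff _ _).mp hc)
          · exact e3 u hu
        | false =>
          have hnbs : nb ∉ s.1 := (pvContains_false_iff _ _).mp hc
          have hstep : pvStepA g f s nb = pvDfsA g f nb s.1 s.2 := by
            simp only [pvStepA, hc, Bool.false_eq_true, if_false]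
          rw [hstep]
          have htk : t ∈ g.keys := by
            by_contra hk
            have hgc : g.contains t = false := by
              cases hgc : g.contains t with
              | false => rfl
              | true => exact absurd ((PySem.Dict.contains_iff_mem_keys g t).mp hgc) hk
            have hadj := PySem.Dict.getD_of_not_contains g ([] : List String) hgc
            have := hns nb List.mem_cons_self
            rw [hadj] at this
            simp at this
          have hunvis : pvUnvisKeys g s.1 < f := by
            have m1 : pvUnvisKeys g s.1 ≤ pvUnvisKeys g (PySem.Set.add v t) := by
              apply pvUnvisKeys_mono
              intro x hx
              rcases (PySem.Set.mem_add v t x).mp hx with h | rfl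
              · exact h2 x h
              · exact h3
            have m2 := pvUnvisKeys_add_lt (g := g) htk htv
            omega
          obtain ⟨d1, d2, d3, d4, d5, d6⟩ := ih s.1 nb s.2 h1 hnbs hunvis
          have hreach_nb : pvReach g v t nb :=
            pvReach.step pvReach.refl htv (hns nb List.mem_cons_self)
          obtain ⟨e1, e2, e3, e4, e5, e6, e7, e8⟩ :=
            ihns (pvDfsA g f nb s.1 s.2) (fun u hu => hns u (List.mem_cons_of_mem _ hu)) d1
              (fun x hx => d2 x (h2 x hx)) (d2 t h3)
              (by
                intro x hx
                rcases d4 x hx with h | h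
                · exact h4 x h
                · exact Or.inr (pvReach_trans_mono h2 hreach_nb h))
              (by
                intro x hx hxv hxt w hw
                by_cases hxs : x ∈ s.1
                · exact d2 w (h5 x hxs hxv hxt w hw)
                · exact d5 x hx hxs w hw)
              (by omega)
          refine ⟨e1, ?_, ?_, e4, e5, e6, e7, e8⟩
          · exact fun x hx => e2 x (d2 x hx)
          · intro u hu
            rcases List.mem_cons.mp hu with rfl | hu
            · exact e2 u d3
            · exact e3 u hu
    have hstart := key (g.getD t []) (PySem.Set.add v t, c ++ [t]) (fun u hu => hu)
      (PySem.Set.nodup_add v t hnd)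
      (fun x hx => (PySem.Set.mem_add v t x).mpr (Or.inl hx))
      ((PySem.Set.mem_add v t t).mpr (Or.inr rfl))
      (by
        intro x hx
        rcases (PySem.Set.mem_add v t x).mp hx with h | rfl
        · exact Or.inl h
        · exact Or.inr pvReach.refl)
      (by
        intro x hx hxv hxt w hw
        rcases (PySem.Set.mem_add v t x).mp hx with h | rfl
        · exact absurd h hxv
        · exact absurd rfl hxt)
      (by
        rw [pvLen_add v t htv]
        simp
        omega)
    obtain ⟨e1, e2, e3, e4, e5, e6, e7, e8⟩ := hstart
    rw [pvDfsA_succ]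
    refine ⟨e1, e5, e4, e6, ?_, e8⟩
    intro x hx hxv w hw
    by_cases hxt : x = t
    · subst hxt; exact e3 w hw
    · exact e7 x hx hxv hxt w hw

-- ===== adjacency characterizations: both graphs have the same neighbor sets =====

def pvG (g : PySem.Dict String (List String)) (k x : String) : PySem.Dict String (List String) :=
  if g.contains k then g.modify k [] (fun l => l ++ [x]) else g

def pvG0 (towns : List String) : PySem.Dict String (List String) :=
  towns.foldl (fun g t => g.insert t ([] : List String)) PySem.Dict.empty

def pvRoadStep (g : PySem.Dict String (List String)) (r : String × String) :
    PySem.Dict String (List String) :=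
  pvG (pvG g r.1 r.2) r.2 r.1

theorem pvBuildGraph_eq (towns : List String) (roads : List (String × String)) :
    pvBuildGraph towns roads = roads.foldl pvRoadStep (pvG0 towns) := rfl

theorem pvKeys_G (g : PySem.Dict String (List String)) (k x : String) :
    (pvG g k x).keys = g.keys := by
  unfold pvG
  by_cases hc : g.contains k
  · rw [if_pos hc, PySem.Dict.keys_modify, PySem.Dict.keys_insert_of_contains _ _ hc]
  · rw [if_neg hc]

theorem pvContains_congr_keys (g g' : PySem.Dict String (List String))
    (h : g'.keys = g.keys) (u : String) : g'.contains u = g.contains u := by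
  by_cases hm : u ∈ g.keys
  · rw [(PySem.Dict.contains_iff_mem_keys g u).mpr hm,
      (PySem.Dict.contains_iff_mem_keys g' u).mpr (h ▸ hm)]
  · have h1 : g.contains u = false := by
      cases hc : g.contains u with
      | false => rfl
      | true => exact absurd ((PySem.Dict.contains_iff_mem_keys g u).mp hc) hm
    have h2 : g'.contains u = false := by
      cases hc : g'.contains u with
      | false => rfl
      | true => exact absurd (h ▸ (PySem.Dict.contains_iff_mem_keys g' u).mp hc) hm
    rw [h1, h2]

theorem pvKeys_roadStep (g : PySem.Dict String (List String)) (r : String × String) :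
    (pvRoadStep g r).keys = g.keys := by
  unfold pvRoadStep
  rw [pvKeys_G, pvKeys_G]

theorem pvKeys_roadsFold (roads : List (String × String)) :
    ∀ g : PySem.Dict String (List String), (roads.foldl pvRoadStep g).keys = g.keys := by
  induction roads with
  | nil => intro g; rfl
  | cons r roads ih => intro g; rw [List.foldl_cons, ih, pvKeys_roadStep]

theorem pvMem_G (g : PySem.Dict String (List String)) (k x u w : String) :
    w ∈ (pvG g k x).getD u [] ↔
      w ∈ g.getD u [] ∨ (u = k ∧ g.contains k = true ∧ w = x) := by
  unfold pvG
  by_cases hc : g.contains k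
  · rw [if_pos hc]
    by_cases huk : u = k
    · subst huk
      rw [PySem.Dict.getD_modify, if_pos rfl]
      simp [hc]
    · rw [PySem.Dict.getD_modify, if_neg huk]
      simp [huk]
  · rw [if_neg hc]
    simp [hc]

theorem pvMem_roadStep (g : PySem.Dict String (List String)) (r : String × String)
    (u w : String) :
    w ∈ (pvRoadStep g r).getD u [] ↔
      w ∈ g.getD u [] ∨ (g.contains u = true ∧ ((u, w) = r ∨ (w, u) = r)) := by
  obtain ⟨a, b⟩ := r
  unfold pvRoadStep
  rw [pvMem_G, pvMem_G]
  have hcb : (pvG g a b).contains b = g.contains b :=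
    pvContains_congr_keys g (pvG g a b) (pvKeys_G g a b) b
  rw [hcb]
  simp only [Prod.mk.injEq]
  constructor
  · rintro ((h | ⟨rfl, hc, rfl⟩) | ⟨rfl, hc, rfl⟩)
    · exact Or.inl h
    · exact Or.inr ⟨hc, Or.inl ⟨rfl, rfl⟩⟩
    · exact Or.inr ⟨hc, Or.inr ⟨rfl, rfl⟩⟩
  · rintro (h | ⟨hc, (⟨rfl, rfl⟩ | ⟨rfl, rfl⟩)⟩)
    · exact Or.inl (Or.inl h)
    · exact Or.inl (Or.inr ⟨rfl, hc, rfl⟩)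
    · exact Or.inr ⟨rfl, hc, rfl⟩

theorem pvMem_roadsFold (u w : String) :
    ∀ (rs : List (String × String)) (g : PySem.Dict String (List String)),
    w ∈ (rs.foldl pvRoadStep g).getD u [] ↔
      w ∈ g.getD u [] ∨ (g.contains u = true ∧ ((u, w) ∈ rs ∨ (w, u) ∈ rs)) := by
  intro rs
  induction rs with
  | nil => intro g; simp
  | cons r rs ih =>
    intro g
    rw [List.foldl_cons, ih (pvRoadStep g r), pvMem_roadStep,
      pvContains_congr_keys g (pvRoadStep g r) (pvKeys_roadStep g r) u]
    simp only [List.mem_cons]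
    tauto

theorem pvMem_foldl_add (l : List String) :
    ∀ (s : List String) (x : String), x ∈ l.foldl PySem.Set.add s ↔ x ∈ s ∨ x ∈ l := by
  induction l with
  | nil => intro s x; simp
  | cons a l ih =>
    intro s x
    rw [List.foldl_cons, ih]
    rw [PySem.Set.mem_add]
    simp only [List.mem_cons]
    tauto

theorem pvG0_getD (towns : List String) :
    ∀ (d : PySem.Dict String (List String)), (∀ j, d.getD j [] = []) →
    ∀ k, ((towns.foldl (fun g t => g.insert t ([] : List String)) d).getD k []) = [] := by
  induction towns with
  | nil => intro d hd k; exact hd k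
  | cons t towns ih =>
    intro t0 hd k
    rw [List.foldl_cons]
    refine ih _ (fun j => ?_) k
    rw [PySem.Dict.getD_insert]
    split
    · rfl
    · exact hd j

theorem pvKeys_g0_mem (towns : List String) (u : String) :
    u ∈ (pvG0 towns).keys ↔ u ∈ towns := by
  unfold pvG0
  rw [PySem.Dict.keys_foldl_insert towns (fun _ _ => []) PySem.Dict.empty]
  show u ∈ towns.foldl PySem.Set.add (PySem.Dict.empty.keys (ν := List String)) ↔ u ∈ towns
  rw [pvMem_foldl_add, PySem.Dict.keys_empty]
  simp

theorem pvAdjA (towns : List String) (roads : List (String × String)) (u w : String) :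
    w ∈ (pvBuildGraph towns roads).getD u [] ↔
      u ∈ towns ∧ ((u, w) ∈ roads ∨ (w, u) ∈ roads) := by
  have h0 : (pvG0 towns).getD u [] = [] :=
    pvG0_getD towns PySem.Dict.empty (fun j => PySem.Dict.getD_empty j []) u
  rw [pvBuildGraph_eq, pvMem_roadsFold u w roads (pvG0 towns), h0]
  have hc : (pvG0 towns).contains u = true ↔ u ∈ towns := by
    rw [PySem.Dict.contains_iff_mem_keys, pvKeys_g0_mem]
  simp [hc]

theorem pvMem_nbrs (u w : String) :
    ∀ (rs : List (String × String)) (d : PySem.Dict String (List String)),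
    w ∈ (rs.foldl
        (fun d r => (d.modify r.1 [] (fun l => l ++ [r.2])).modify r.2 [] (fun l => l ++ [r.1]))
        d).getD u [] ↔
      w ∈ d.getD u [] ∨ ((u, w) ∈ rs ∨ (w, u) ∈ rs) := by
  intro rs
  induction rs with
  | nil => intro d; simp
  | cons r rs ih =>
    intro d
    rw [List.foldl_cons, ih]
    have hstep : w ∈ ((d.modify r.1 [] (fun l => l ++ [r.2])).modify r.2 []
        (fun l => l ++ [r.1]) : PySem.Dict String (List String)).getD u [] ↔
        w ∈ d.getD u [] ∨ ((u, w) = r ∨ (w, u) = r) := by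
      obtain ⟨a, b⟩ := r
      rw [PySem.Dict.getD_modify]
      by_cases hub : u = b
      · subst hub
        rw [if_pos rfl, PySem.Dict.getD_modify]
        by_cases hua : u = a
        · subst hua
          rw [if_pos rfl]
          simp only [List.mem_append, List.mem_singleton, Prod.mk.injEq]
          tauto
        · rw [if_neg hua]
          simp only [List.mem_append, List.mem_singleton, Prod.mk.injEq]
          tauto
      · rw [if_neg hub, PySem.Dict.getD_modify]
        by_cases hua : u = a
        · subst hua
          rw [if_pos rfl]
          simp only [List.mem_append, List.mem_singleton, Prod.mk.injEq]
          tauto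
        · rw [if_neg hua]
          simp only [Prod.mk.injEq]
          tauto
    rw [hstep]
    simp only [List.mem_cons]
    tauto

theorem pvFoldInsert_getD (val : String → List String) :
    ∀ (ts : List String) (d : PySem.Dict String (List String)) (u : String),
    ((ts.foldl (fun g t => g.insert t (val t)) d).getD u []) =
      if u ∈ ts then val u else d.getD u [] := by
  intro ts
  induction ts with
  | nil => intro d u; simp
  | cons t ts ih =>
    intro d u
    rw [List.foldl_cons, ih, PySem.Dict.getD_insert]
    by_cases h1 : u ∈ ts
    · rw [if_pos h1, if_pos (List.mem_cons_of_mem _ h1)]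
    · rw [if_neg h1]
      by_cases h2 : u = t
      · subst h2
        rw [if_pos rfl, if_pos List.mem_cons_self]
      · rw [if_neg h2, if_neg (by simp [h2, h1])]

theorem pvAdjB (towns : List String) (roads : List (String × String)) (u w : String) :
    w ∈ (pvBuildAdj towns roads).getD u [] ↔
      u ∈ towns ∧ ((u, w) ∈ roads ∨ (w, u) ∈ roads) := by
  show w ∈ (towns.foldl (fun g t => g.insert t ((pvNbrs roads).getD t []))
      PySem.Dict.empty).getD u [] ↔ _
  rw [pvFoldInsert_getD (fun t => (pvNbrs roads).getD t [])]
  by_cases h : u ∈ towns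
  · rw [if_pos h]
    have hn : w ∈ (pvNbrs roads).getD u [] ↔ ((u, w) ∈ roads ∨ (w, u) ∈ roads) := by
      unfold pvNbrs
      rw [pvMem_nbrs u w roads PySem.Dict.empty]
      simp [PySem.Dict.getD_empty]
    rw [hn]
    simp [h]
  · rw [if_neg h]
    simp [h, PySem.Dict.getD_empty]

theorem pvAdj_iff (towns : List String) (roads : List (String × String)) (u w : String) :
    w ∈ (pvBuildGraph towns roads).getD u [] ↔ w ∈ (pvBuildAdj towns roads).getD u [] := by
  rw [pvAdjA, pvAdjB]

-- key-count bounds (fuel sufficiency)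
theorem pvFoldAdd_len (l : List String) :
    ∀ s : List String, (l.foldl PySem.Set.add s).length ≤ s.length + l.length := by
  induction l with
  | nil => intro s; simp
  | cons a l ih =>
    intro s
    rw [List.foldl_cons]
    refine le_trans (ih _) ?_
    have : (PySem.Set.add s a).length ≤ s.length + 1 := by
      by_cases h : a ∈ s
      · simp [PySem.Set.add, h]
      · rw [pvLen_add s a h]
    simp only [List.length_cons]
    omega

theorem pvKeys_buildGraph_len (towns : List String) (roads : List (String × String)) :
    (pvBuildGraph towns roads).keys.length ≤ towns.length := by
  rw [pvBuildGraph_eq, pvKeys_roadsFold, pvG0,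
    PySem.Dict.keys_foldl_insert towns (fun _ _ => []) PySem.Dict.empty]
  have := pvFoldAdd_len towns (PySem.Dict.empty.keys (ν := List String))
  simp only [PySem.Set.update, PySem.Dict.keys_empty] at this ⊢
  simpa using this

theorem pvKeys_buildAdj_len (towns : List String) (roads : List (String × String)) :
    (pvBuildAdj towns roads).keys.length ≤ towns.length := by
  show (towns.foldl (fun g t => g.insert t ((pvNbrs roads).getD t []))
      PySem.Dict.empty).keys.length ≤ towns.length
  rw [PySem.Dict.keys_foldl_insert towns (fun _ t => (pvNbrs roads).getD t []) PySem.Dict.empty]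
  have := pvFoldAdd_len towns (PySem.Dict.empty.keys (ν := List String))
  simp only [PySem.Set.update, PySem.Dict.keys_empty] at this ⊢
  simpa using this

-- ===== B's BFS level fold =====
theorem pvLevelFold (g : PySem.Dict String (List String)) :
    ∀ (ns : List String) (s : PySem.Set String × Int × List String), s.1.Nodup →
    (ns.foldl (pvLevel g) s).1.Nodup ∧
    (∀ x ∈ s.1, x ∈ (ns.foldl (pvLevel g) s).1) ∧
    (∀ w ∈ s.2.2, w ∈ (ns.foldl (pvLevel g) s).2.2) ∧
    (∀ p ∈ ns, p ∈ (ns.foldl (pvLevel g) s).1) ∧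
    (∀ x ∈ (ns.foldl (pvLevel g) s).1, x ∈ s.1 ∨ x ∈ ns) ∧
    (∀ w ∈ (ns.foldl (pvLevel g) s).2.2,
      w ∈ s.2.2 ∨ ∃ u, u ∈ (ns.foldl (pvLevel g) s).1 ∧ u ∉ s.1 ∧ w ∈ g.getD u []) ∧
    (∀ x ∈ (ns.foldl (pvLevel g) s).1, x ∉ s.1 →
      ∀ w ∈ g.getD x [], w ∈ (ns.foldl (pvLevel g) s).2.2) ∧
    ((ns.foldl (pvLevel g) s).2.1 + (s.1.length : Int) =
      s.2.1 + (((ns.foldl (pvLevel g) s).1.length : Int))) := by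
  intro ns
  induction ns with
  | nil =>
    intro s hnd
    exact ⟨hnd, fun x hx => hx, fun w hw => hw, by simp, fun x hx => Or.inl hx,
      fun w hw => Or.inl hw, fun x hx hxs => absurd hx hxs, by simp⟩
  | cons node ns ih =>
    intro s hnd
    rw [List.foldl_cons]
    cases hc : PySem.Set.contains s.1 node with
    | true =>
      have hstep : pvLevel g s node = s := by simp only [pvLevel, hc, if_true]
      rw [hstep]
      obtain ⟨e1, e2, e3, e4, e5, e6, e7, e8⟩ := ih s hnd
      refine ⟨e1, e2, e3, ?_, ?_, e6, e7, e8⟩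
      · intro p hp
        rcases List.mem_cons.mp hp with rfl | hp
        · exact e2 p ((pvContains_iff _ _).mp hc)
        · exact e4 p hp
      · intro x hx
        rcases e5 x hx with h | h
        · exact Or.inl h
        · exact Or.inr (List.mem_cons_of_mem _ h)
    | false =>
      have hns : node ∉ s.1 := (pvContains_false_iff _ _).mp hc
      have hstep : pvLevel g s node =
          (PySem.Set.add s.1 node, s.2.1 + 1, s.2.2 ++ g.getD node []) := by
        simp only [pvLevel, hc, Bool.false_eq_true, if_false]
      rw [hstep]
      obtain ⟨e1, e2, e3, e4, e5, e6, e7, e8⟩ :=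
        ih (PySem.Set.add s.1 node, s.2.1 + 1, s.2.2 ++ g.getD node [])
          (PySem.Set.nodup_add s.1 node hnd)
      have hmem_add := PySem.Set.mem_add s.1 node
      refine ⟨e1, ?_, ?_, ?_, ?_, ?_, ?_, ?_⟩
      · exact fun x hx => e2 x ((hmem_add x).mpr (Or.inl hx))
      · exact fun w hw => e3 w (List.mem_append.mpr (Or.inl hw))
      · intro p hp
        rcases List.mem_cons.mp hp with rfl | hp
        · exact e2 p ((hmem_add p).mpr (Or.inr rfl))
        · exact e4 p hp
      · intro x hx
        rcases e5 x hx with h | h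
        · rcases (hmem_add x).mp h with h' | rfl
          · exact Or.inl h'
          · exact Or.inr List.mem_cons_self
        · exact Or.inr (List.mem_cons_of_mem _ h)
      · intro w hw
        rcases e6 w hw with h | ⟨u, hu1, hu2, hu3⟩
        · rcases List.mem_append.mp h with h' | h'
          · exact Or.inl h'
          · exact Or.inr ⟨node, e2 node ((hmem_add node).mpr (Or.inr rfl)), hns, h'⟩
        · refine Or.inr ⟨u, hu1, fun hc' => hu2 ((hmem_add u).mpr (Or.inl hc')), hu3⟩
      · intro x hx hxs w hw
        by_cases hxn : x ∈ PySem.Set.add s.1 node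
        · rcases (hmem_add x).mp hxn with h | rfl
          · exact absurd h hxs
          · exact e3 w (List.mem_append.mpr (Or.inr hw))
        · exact e7 x hx hxn w hw
      · rw [pvLen_add s.1 node hns] at e8
        push_cast at e8 ⊢
        omega

-- ===== main lemma for B's BFS loop =====
theorem pvBfs_spec (g : PySem.Dict String (List String)) (v0 : List String) (t : String) :
    ∀ (f : Nat) (frontier : List String) (v : PySem.Set String) (n : Int),
    2 * pvUnvisKeys g v + 2 ≤ f → v.Nodup →
    (∀ x ∈ v0, x ∈ v) →
    (∀ x ∈ v, x ∈ v0 ∨ pvReach g v0 t x) →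
    (∀ p ∈ frontier, p ∈ v ∨ pvReach g v0 t p) →
    (∀ x ∈ v, x ∉ v0 → ∀ w ∈ g.getD x [], w ∈ v ∨ w ∈ frontier) →
    (pvBfs g f frontier v n).1.Nodup ∧
    (∀ x ∈ v, x ∈ (pvBfs g f frontier v n).1) ∧
    (∀ p ∈ frontier, p ∈ (pvBfs g f frontier v n).1) ∧
    (∀ x ∈ (pvBfs g f frontier v n).1, x ∈ v0 ∨ pvReach g v0 t x) ∧
    (∀ x ∈ (pvBfs g f frontier v n).1, x ∉ v0 → ∀ w ∈ g.getD x [], w ∈ (pvBfs g f frontier v n).1) ∧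
    (pvBfs g f frontier v n).2 + (v.length : Int) = n + ((pvBfs g f frontier v n).1.length : Int) := by
  intro f
  induction f with
  | zero => intro frontier v n hf; omega
  | succ f ih =>
    intro frontier v n hf hnd hB1 hB2 hB3 hB4
    match frontier with
    | [] =>
      simp only [pvBfs]
      refine ⟨hnd, fun x hx => hx, by simp, hB2, ?_, by trivial⟩
      intro x hx hxv0 w hw
      rcases hB4 x hx hxv0 w hw with h | h
      · exact h
      · simp at h
    | t' :: fs =>
      obtain ⟨e1, e2, e3, e4, e5, e6, e7, e8⟩ :=
        pvLevelFold g (t' :: fs) (v, n, ([] : List String)) hnd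
      have hrun : pvBfs g (f + 1) (t' :: fs) v n =
          pvBfs g f ((t' :: fs).foldl (pvLevel g) (v, n, [])).2.2
            ((t' :: fs).foldl (pvLevel g) (v, n, [])).1
            ((t' :: fs).foldl (pvLevel g) (v, n, [])).2.1 := rfl
      set r := (t' :: fs).foldl (pvLevel g) (v, n, ([] : List String)) with hr
      -- invariants after the level
      have hB1' : ∀ x ∈ v0, x ∈ r.1 := fun x hx => e2 x (hB1 x hx)
      have hB2' : ∀ x ∈ r.1, x ∈ v0 ∨ pvReach g v0 t x := by
        intro x hx
        rcases e5 x hx with h | h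
        · exact hB2 x h
        · rcases hB3 x h with h' | h'
          · exact hB2 x h'
          · exact Or.inr h'
      have hB3' : ∀ p ∈ r.2.2, p ∈ r.1 ∨ pvReach g v0 t p := by
        intro p hp
        rcases e6 p hp with h | ⟨u, hu1, hu2, hu3⟩
        · simp at h
        · have huv0 : u ∉ v0 := fun h' => hu2 (hB1 u h')
          have hru : pvReach g v0 t u := by
            rcases hB2' u hu1 with h' | h'
            · exact absurd h' huv0
            · exact h'
          exact Or.inr (pvReach.step hru huv0 hu3)
      have hB4' : ∀ x ∈ r.1, x ∉ v0 → ∀ w ∈ g.getD x [], w ∈ r.1 ∨ w ∈ r.2.2 := by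
        intro x hx hxv0 w hw
        by_cases hxv : x ∈ v
        · rcases hB4 x hxv hxv0 w hw with h | h
          · exact Or.inl (e2 w h)
          · exact Or.inl (e4 w h)
        · exact Or.inr (e7 x hx hxv w hw)
      by_cases hn : r.2.2 = []
      · have hstop : pvBfs g f r.2.2 r.1 r.2.1 = (r.1, r.2.1) := by
          rw [hn]; cases f <;> rfl
        rw [hrun, hstop]
        refine ⟨e1, e2, e4, hB2', ?_, ?_⟩
        · intro x hx hxv0 w hw
          rcases hB4' x hx hxv0 w hw with h | h
          · exact h
          · rw [hn] at h; simp at h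
        · simpa using e8
      · -- some node with a nonempty adjacency list was newly visited: a key left the unvisited set
        obtain ⟨p, hp⟩ := List.exists_mem_of_ne_nil r.2.2 hn
        have hkey : ∃ u, u ∈ g.keys ∧ u ∉ v ∧ u ∈ r.1 := by
          rcases e6 p hp with h | ⟨u, hu1, hu2, hu3⟩
          · simp at h
          · refine ⟨u, ?_, hu2, hu1⟩
            by_contra hk
            have hgc : g.contains u = false := by
              cases hgc : g.contains u with
              | false => rfl
              | true => exact absurd ((PySem.Dict.contains_iff_mem_keys g u).mp hgc) hk
            rw [PySem.Dict.getD_of_not_contains g ([] : List String) hgc] at hu3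
            simp at hu3
        obtain ⟨u, huk, huv, hur⟩ := hkey
        have hdec : pvUnvisKeys g r.1 + 1 ≤ pvUnvisKeys g v := by
          have m1 : pvUnvisKeys g r.1 ≤ pvUnvisKeys g (PySem.Set.add v u) := by
            apply pvUnvisKeys_mono
            intro x hx
            rcases (PySem.Set.mem_add v u x).mp hx with h | rfl
            · exact e2 x h
            · exact hur
          have m2 := pvUnvisKeys_add_lt (g := g) huk huv
          omega
        have hf' : 2 * pvUnvisKeys g r.1 + 2 ≤ f := by omega
        obtain ⟨c1, c2, c3, c4, c5, c6⟩ := ih r.2.2 r.1 r.2.1 hf' e1 hB1' hB2' hB3' hB4'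
        rw [hrun]
        refine ⟨c1, fun x hx => c2 x (e2 x hx), fun p' hp' => c2 p' (e4 p' hp'), c4, c5, ?_⟩
        have e8' : r.2.1 + (v.length : Int) = n + (r.1.length : Int) := by simpa using e8
        omega

-- ===== the two outer loops agree =====
theorem pvOuterEq (gA gB : PySem.Dict String (List String))
    (hadj : ∀ u w, w ∈ gA.getD u [] ↔ w ∈ gB.getD u [])
    (fA fB : Nat) (hfA : gA.keys.length < fA) (hfB : 2 * gB.keys.length + 2 ≤ fB) :
    ∀ (ts : List String) (sA : PySem.Set String × Int) (vB : PySem.Set String) (cnt : Int),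
    sA.1.Nodup → vB.Nodup → (∀ x, x ∈ sA.1 ↔ x ∈ vB) → sA.2 = cnt →
    (ts.foldl
      (fun (s : PySem.Set String × Int) t =>
        if PySem.Set.contains s.1 t then s
        else
          let r := pvDfsA gA fA t s.1 []
          (r.1, if 1 < r.2.length then s.2 + 1 else s.2)) sA).2 =
    pvOuterB gB fB ts vB cnt := by
  intro ts
  induction ts with
  | nil => intro sA vB cnt _ _ _ h4; simpa [pvOuterB] using h4
  | cons t ts ih =>
    intro sA vB cnt hndA hndB hiff hcnt
    rw [List.foldl_cons]
    by_cases hmem : t ∈ sA.1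
    · have hA : PySem.Set.contains sA.1 t = true := (pvContains_iff _ _).mpr hmem
      have hB : PySem.Set.contains vB t = true := (pvContains_iff _ _).mpr ((hiff t).mp hmem)
      simp only [pvOuterB, hA, hB, if_true]
      exact ih sA vB cnt hndA hndB hiff hcnt
    · have hmemB : t ∉ vB := fun h => hmem ((hiff t).mpr h)
      have hA : PySem.Set.contains sA.1 t = false := (pvContains_false_iff _ _).mpr hmem
      have hB : PySem.Set.contains vB t = false := (pvContains_false_iff _ _).mpr hmemB
      simp only [pvOuterB, hA, hB, Bool.false_eq_true, if_false]
      obtain ⟨a1, a2, a3, a4, a5, a6⟩ := pvDfsA_spec gA fA sA.1 t [] hndA hmem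
        (lt_of_le_of_lt (pvUnvisKeys_le gA sA.1) hfA)
      obtain ⟨b1, b2, b3, b4, b5, b6⟩ := pvBfs_spec gB vB t fB [t] vB 0
        (le_trans (by have := pvUnvisKeys_le gB vB; omega) hfB) hndB
        (fun x hx => hx) (fun x hx => Or.inl hx)
        (by
          intro p hp
          rcases List.mem_cons.mp hp with rfl | hp
          · exact Or.inr pvReach.refl
          · simp at hp)
        (fun x hx hxv0 => absurd hx hxv0)
      have charA := pvChar a2 a3 a4 a5
      have charB := pvChar b2 (b3 t List.mem_cons_self) b4 b5
      have hmemr : ∀ x, x ∈ (pvDfsA gA fA t sA.1 []).1 ↔ x ∈ (pvBfs gB fB [t] vB 0).1 := by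
        intro x
        rw [charA x, charB x]
        constructor
        · rintro (h | h)
          · exact Or.inl ((hiff x).mp h)
          · exact Or.inr (pvReach_adj hadj (pvReach_congr hiff h))
        · rintro (h | h)
          · exact Or.inl ((hiff x).mpr h)
          · exact Or.inr (pvReach_adj (fun u w => (hadj u w).symm)
              (pvReach_congr (fun y => (hiff y).symm) h))
      have hlenS : sA.1.length = vB.length :=
        ((List.perm_ext_iff_of_nodup hndA hndB).mpr hiff).length_eq
      have hlenR : (pvDfsA gA fA t sA.1 []).1.length = (pvBfs gB fB [t] vB 0).1.length :=
        ((List.perm_ext_iff_of_nodup a1 b1).mpr hmemr).length_eq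
      simp only [List.length_nil] at a6
      have hcond : (1 < (pvDfsA gA fA t sA.1 []).2.length) ↔
          ((1 : Int) < (pvBfs gB fB [t] vB 0).2) := by omega
      by_cases hgt : 1 < (pvDfsA gA fA t sA.1 []).2.length
      · rw [if_pos hgt, if_pos (hcond.mp hgt)]
        exact ih _ _ _ a1 b1 hmemr (by rw [hcnt])
      · rw [if_neg hgt, if_neg (fun h => hgt (hcond.mpr h))]
        exact ih _ _ _ a1 b1 hmemr hcnt

-- ===== VERDICT (by name: the statement is the Claim_ definition above) =====
theorem roadNetworks_spec : Claim_equal_roadNetworks := by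
  intro towns roads _
  unfold Spec_roadNetworks roadNetworks roadNetworks_alt
  apply pvOuterEq (pvBuildGraph towns roads) (pvBuildAdj towns roads)
    (pvAdj_iff towns roads)
  · have := pvKeys_buildGraph_len towns roads
    simp only [pvFuelA]; omega
  · have := pvKeys_buildAdj_len towns roads
    omega
  · simp [PySem.Set.empty]
  · simp [PySem.Set.empty]
  · simp [PySem.Set.empty]
  · rfl
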